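-- pv_equiv track=rewrite | github.com/AugustBugge/canonicalSystems | classify_coin_systems.py | check_canonical
-- ===== SOURCE A (Python) =====
-- from typing import List, Tuple, Optional
--
-- def greedy_num_coins(amount: int, coins_desc: List[int]) -> Optional[int]:
--     remaining = amount
--     count = 0
--     for c in coins_desc:
--         if remaining <= 0:
--             break
--         k = remaining // c
--         if k:
--             count += k
--             remaining -= k * c
--     return count if remaining == 0 else None
--
-- def dp_min_coins_up_to(max_amount: int, coins_asc: List[int]) -> List[int]:
--     INF = 10**9
--     dp = [INF] * (max_amount + 1)
--     dp[0] = 0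
--     for x in range(1, max_amount + 1):
--         best = dp[x]
--         for c in coins_asc:
--             if c <= x:
--                 cand = dp[x - c] + 1
--                 if cand < best:
--                     best = cand
--         dp[x] = best
--     return dp
--
-- def check_canonical(coins_sorted: List[int], max_amount: int, require_reachable: bool) -> Tuple[bool, int]:
--     coins_desc = list(reversed(coins_sorted))
--     dp = dp_min_coins_up_to(max_amount, coins_sorted)
--     INF = 10**9
--     reachable_count = 0
--     for a in range(1, max_amount + 1):
--         if dp[a] >= INF:
--             continue
--         reachable_count += 1
--         g = greedy_num_coins(a, coins_desc)
--         if g != dp[a]: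
--             return (False, reachable_count)
--     if require_reachable and reachable_count == 0:
--         return (False, reachable_count)
--     return (True, reachable_count)
-- ===== SOURCE B (Python) =====
-- INF = 10 ** 9
--
-- def _greedy(rem, coins_desc):
--     if rem == 0:
--         return 0
--     if not coins_desc:
--         return None
--     c = coins_desc[0]
--     q = rem // c
--     sub = _greedy(rem - q * c, coins_desc[1:])
--     return None if sub is None else q + sub
--
-- def check_canonical(coins_sorted, max_amount, require_reachable):
--     coins_desc = coins_sorted[::-1]
--     dp = [0]
--     reachable = 0
--     for x in range(1, max_amount + 1):
--         best = min((dp[x - c] + 1 for c in coins_sorted if c <= x and dp[x - c] < INF),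
--                    default=INF)
--         dp.append(best)
--         if best < INF:
--             reachable += 1
--             if _greedy(x, coins_desc) != best:
--                 return (False, reachable)
--     if require_reachable and reachable == 0:
--         return (False, reachable)
--     return (True, reachable)
-- ===== Notes on version B (the rewrite author's own statement) =====
-- stated objective: alternative
-- what changed: B replaces A's two-pass design (precompute the full DP table with a sentinel-filled fixed array, then a second checking pass with an iterative greedy loop) by a single forward loop that grows the DP list one amount at a time, counts reachable amounts and early-returns on the first greedy/DP mismatch, with the greedy count computed by structural recursion over the descending coin list.
-- outside the precondition, e.g. on check_canonical([0], 1, False): A returns (True, 0), B raises IndexError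
import Mathlib
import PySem

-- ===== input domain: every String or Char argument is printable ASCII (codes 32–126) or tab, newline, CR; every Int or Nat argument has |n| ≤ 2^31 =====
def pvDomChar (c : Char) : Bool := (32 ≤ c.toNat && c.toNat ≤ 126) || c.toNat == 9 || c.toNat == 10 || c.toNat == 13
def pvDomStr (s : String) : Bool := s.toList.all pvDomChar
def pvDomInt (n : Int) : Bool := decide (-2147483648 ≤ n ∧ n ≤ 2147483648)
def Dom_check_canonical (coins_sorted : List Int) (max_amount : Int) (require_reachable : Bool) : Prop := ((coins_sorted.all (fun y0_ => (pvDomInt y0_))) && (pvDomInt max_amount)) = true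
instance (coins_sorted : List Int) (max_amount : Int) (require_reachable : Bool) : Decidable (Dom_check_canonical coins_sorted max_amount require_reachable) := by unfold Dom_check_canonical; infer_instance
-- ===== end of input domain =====

-- B fuses A's two passes (full DP table, then a separate greedy-check pass) into one forward
-- loop that grows the DP array and early-returns on the first mismatch, with a recursive greedy;
-- objective: alternative decomposition (same asymptotic cost).
-- Python lists used as O(1)-indexed dp buffers are ported as Array Int (indices are nonnegative
-- and in range on every input admitted by Pre_, where the ports are exact).

-- ===== PORT A =====
def greedy_loop (coins : List Int) (remaining count : Int) : Int × Int :=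
  match coins with
  | [] => (remaining, count)
  | c :: cs =>
    if remaining ≤ 0 then (remaining, count)
    else
      let k := PySem.Int.floordiv remaining c
      if k ≠ 0 then greedy_loop cs (remaining - k * c) (count + k)
      else greedy_loop cs remaining count

def greedy_num_coins (amount : Int) (coins_desc : List Int) : Option Int :=
  let r := greedy_loop coins_desc amount 0
  if r.1 = 0 then some r.2 else none

def dp_min_coins_up_to (max_amount : Int) (coins_asc : List Int) : Array Int :=
  let dp0 := (Array.replicate (max_amount + 1).toNat 1000000000).setIfInBounds 0 0
  (PySem.List.pyRange 1 (max_amount + 1) 1).foldl (fun dp x =>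
    let best := coins_asc.foldl (fun best c =>
      if c ≤ x then
        let cand := dp.getD (x - c).toNat 0 + 1
        if cand < best then cand else best
      else best) (dp.getD x.toNat 0)
    dp.setIfInBounds x.toNat best) dp0

def checkStep (dp : Array Int) (coins_desc : List Int) (st : (Bool × Int) ⊕ Int) (a : Int) : (Bool × Int) ⊕ Int :=
  match st with
  | Sum.inl r => Sum.inl r
  | Sum.inr cnt =>
    if dp.getD a.toNat 0 ≥ 1000000000 then Sum.inr cnt
    else
      let cnt := cnt + 1
      let g := greedy_num_coins a coins_desc
      if g ≠ some (dp.getD a.toNat 0) then Sum.inl (false, cnt)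
      else Sum.inr cnt

def check_canonical (coins_sorted : List Int) (max_amount : Int) (require_reachable : Bool) : Bool × Int :=
  let coins_desc := coins_sorted.reverse
  let dp := dp_min_coins_up_to max_amount coins_sorted
  match (PySem.List.pyRange 1 (max_amount + 1) 1).foldl (checkStep dp coins_desc) (Sum.inr 0) with
  | Sum.inl r => r
  | Sum.inr cnt => if require_reachable && cnt == 0 then (false, cnt) else (true, cnt)

-- ===== PORT B =====
-- min((dp[x-c]+1 for c in coins if c <= x and dp[x-c] < INF), default=INF)
def bbest (dp : Array Int) (x : Int) (coins : List Int) : Int :=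
  (coins.foldl (fun b c =>
      if c ≤ x ∧ dp.getD (x - c).toNat 0 < 1000000000 then
        let cand := dp.getD (x - c).toNat 0 + 1
        some (match b with | none => cand | some m => min m cand)
      else b) (none : Option Int)).getD 1000000000

def greedy_alt (rem : Int) (coins_desc : List Int) : Option Int :=
  if rem = 0 then some 0
  else match coins_desc with
    | [] => none
    | c :: cs =>
      let q := PySem.Int.floordiv rem c
      (greedy_alt (rem - q * c) cs).map (fun s => q + s)

def altStep (coins_sorted coins_desc : List Int) (st : (Bool × Int) ⊕ (Array Int × Int)) (x : Int) :
    (Bool × Int) ⊕ (Array Int × Int) :=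
  match st with
  | Sum.inl r => Sum.inl r
  | Sum.inr (dp, reachable) =>
    let best := bbest dp x coins_sorted
    let dp := dp.push best
    if best < 1000000000 then
      let reachable := reachable + 1
      if greedy_alt x coins_desc ≠ some best then Sum.inl (false, reachable)
      else Sum.inr (dp, reachable)
    else Sum.inr (dp, reachable)

def check_canonical_alt (coins_sorted : List Int) (max_amount : Int) (require_reachable : Bool) : Bool × Int :=
  let coins_desc := coins_sorted.reverse
  match (PySem.List.pyRange 1 (max_amount + 1) 1).foldl (altStep coins_sorted coins_desc)
      (Sum.inr (#[(0 : Int)], 0)) with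
  | Sum.inl r => r
  | Sum.inr (_, reachable) =>
    if require_reachable && reachable == 0 then (false, reachable) else (true, reachable)

-- ===== PRECONDITION & SPEC =====
-- Pre_ excludes negative max_amount (A raises IndexError setting dp[0] on an empty table) and,
-- when the loop actually runs (max_amount ≥ 1), coin lists containing a coin < 1, on which A's
-- dp/greedy passes raise IndexError or ZeroDivisionError (or, for a zero coin, B raises where
-- A happens to skip every amount).
def Pre_check_canonical (coins_sorted : List Int) (max_amount : Int) (require_reachable : Bool) : Prop :=
  0 ≤ max_amount ∧ (max_amount = 0 ∨ ∀ c ∈ coins_sorted, 1 ≤ c)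
instance (coins_sorted : List Int) (max_amount : Int) (require_reachable : Bool) : Decidable (Pre_check_canonical coins_sorted max_amount require_reachable) := by unfold Pre_check_canonical; infer_instance

def pvWitness_check_canonical : List Int × Int × Bool := ([1, 3, 4], 6, true)

def Spec_check_canonical (coins_sorted : List Int) (max_amount : Int) (require_reachable : Bool) (out : Bool × Int) : Prop := out = check_canonical_alt coins_sorted max_amount require_reachable
instance (coins_sorted : List Int) (max_amount : Int) (require_reachable : Bool) (out : Bool × Int) : Decidable (Spec_check_canonical coins_sorted max_amount require_reachable out) := by unfold Spec_check_canonical; infer_instance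

-- ===== CLAIM (what is proved, stated in full; the proofs are below) =====
def Claim_equal_check_canonical : Prop := ∀ (coins_sorted : List Int) (max_amount : Int) (require_reachable : Bool), Dom_check_canonical coins_sorted max_amount require_reachable → Pre_check_canonical coins_sorted max_amount require_reachable → Spec_check_canonical coins_sorted max_amount require_reachable (check_canonical coins_sorted max_amount require_reachable)

-- ===== LEMMAS AND PROOFS =====

-- bridge: Array.getD read through toList
theorem arr_getD_toList (a : Array Int) (n : ℕ) (d : Int) : a.getD n d = a.toList.getD n d := by
  simp [Array.getD_eq_getD_getElem?, List.getD]

-- list model of B's inner min-fold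
def bbestL (dp : List Int) (x : Int) (coins : List Int) : Int :=
  (coins.foldl (fun b c =>
      if c ≤ x ∧ dp.getD (x - c).toNat 0 < 1000000000 then
        let cand := dp.getD (x - c).toNat 0 + 1
        some (match b with | none => cand | some m => min m cand)
      else b) (none : Option Int)).getD 1000000000

theorem bbest_toList (a : Array Int) (x : Int) (coins : List Int) :
    bbest a x coins = bbestL a.toList x coins := by
  unfold bbest bbestL
  simp only [arr_getD_toList]

-- reference DP list: exactly what B's loop builds after k iterations
def refDP (coins : List Int) : ℕ → List Int
  | 0 => [0]
  | k + 1 => refDP coins k ++ [bbestL (refDP coins k) ((k : Int) + 1) coins]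

theorem refDP_length (coins : List Int) (k : ℕ) : (refDP coins k).length = k + 1 := by
  induction k with
  | zero => rfl
  | succ k ih => simp [refDP, ih]

-- A's inner fold equals B's option-min fold when both read the same values
theorem inner_fold_eq (coins : List Int) (x : Int) (dA dB : List Int)
    (hc : ∀ c ∈ coins, 1 ≤ c)
    (hread : ∀ c ∈ coins, c ≤ x → dA.getD (x - c).toNat 0 = dB.getD (x - c).toNat 0) :
    ∀ (b : Option Int) (a : Int), a = b.getD 1000000000 → a ≤ 1000000000 →
      coins.foldl (fun best c =>
        if c ≤ x then
          if dA.getD (x - c).toNat 0 + 1 < best then dA.getD (x - c).toNat 0 + 1 else best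
        else best) a
      = (coins.foldl (fun b c =>
          if c ≤ x ∧ dB.getD (x - c).toNat 0 < 1000000000 then
            some (match b with | none => dB.getD (x - c).toNat 0 + 1 | some m => min m (dB.getD (x - c).toNat 0 + 1))
          else b) b).getD 1000000000 := by
  revert hc hread
  induction coins with
  | nil => intro _ _ b a h1 _; simpa using h1
  | cons c cs ih =>
    intro hc hread b a h1 h2
    have hc1 : (1:Int) ≤ c := hc c (by simp)
    have hcs : ∀ c' ∈ cs, (1:Int) ≤ c' := fun c' h' => hc c' (by simp [h'])
    have hreads : ∀ c' ∈ cs, c' ≤ x →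
        dA.getD (x - c').toNat 0 = dB.getD (x - c').toNat 0 :=
      fun c' h' => hread c' (by simp [h'])
    simp only [List.foldl_cons]
    by_cases hcx : c ≤ x
    · have hv : dA.getD (x - c).toNat 0 = dB.getD (x - c).toNat 0 :=
        hread c (by simp) hcx
      by_cases hlt : dB.getD (x - c).toNat 0 < 1000000000
      · simp only [hv, hcx, hlt, and_self, if_pos]
        cases b with
        | none =>
          simp only [Option.getD_none] at h1
          refine ih hcs hreads _ _ ?_ ?_
          · simp only [Option.getD_some]
            split <;> omega
          · split <;> omega
        | some m =>
          simp only [Option.getD_some] at h1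
          refine ih hcs hreads _ _ ?_ ?_
          · simp only [Option.getD_some, min_def]
            split <;> split <;> omega
          · split <;> omega
      · simp only [hv, hcx, hlt, and_false, if_false, if_pos]
        have : ¬ (dB.getD (x - c).toNat 0 + 1 < a) := by omega
        simp only [this, if_false]
        exact ih hcs hreads b a h1 h2
    · simp only [hcx, if_false, false_and]
      exact ih hcs hreads b a h1 h2

-- A's table-building fold, on the list model, produces refDP plus untouched sentinels
theorem tableAux (coins : List Int) (hc : ∀ c ∈ coins, 1 ≤ c) (n : ℕ) :
    ∀ k : ℕ, k ≤ n →
    (PySem.List.pyRange 1 ((k : Int) + 1) 1).foldl (fun dp x =>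
      dp.set x.toNat (coins.foldl (fun best c =>
        if c ≤ x then
          if dp.getD (x - c).toNat 0 + 1 < best then dp.getD (x - c).toNat 0 + 1 else best
        else best) (dp.getD x.toNat 0)))
      ((List.replicate ((n : Int) + 1).toNat 1000000000).set 0 0)
    = refDP coins k ++ List.replicate (n - k) 1000000000 := by
  intro k
  induction k with
  | zero =>
    intro _
    rw [show ((0:ℕ):Int) + 1 = 1 by norm_num, PySem.List.pyRange_one_eq_nil (by norm_num)]
    rw [show ((n:Int)+1).toNat = n+1 by omega]
    simp [List.replicate_succ, refDP]
  | succ k ih =>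
    intro hk1
    have hklt : k < n := by omega
    rw [show ((k+1:ℕ):Int) + 1 = ((k:Int)+1) + 1 by push_cast; ring]
    rw [PySem.List.pyRange_one_succ_right (by omega), List.foldl_append, ih (by omega)]
    simp only [List.foldl_cons, List.foldl_nil]
    set t := refDP coins k ++ List.replicate (n - k) 1000000000 with ht
    have hlenr : (refDP coins k).length = k + 1 := refDP_length coins k
    have hnk : n - k = (n - (k+1)) + 1 := by omega
    have htn : ((k:Int)+1).toNat = k + 1 := by omega
    -- the starting read dp[x] is the first INF of the replicate block
    have hstart : t.getD ((k:Int)+1).toNat 0 = 1000000000 := by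
      rw [htn, ht, ← hlenr, hnk]
      simp [List.getD, List.getElem?_append_right, List.replicate_succ]
    -- reads at x - c agree between t and refDP coins k
    have hread : ∀ c ∈ coins, c ≤ (k:Int)+1 →
        t.getD (((k:Int)+1) - c).toNat 0 = (refDP coins k).getD (((k:Int)+1) - c).toNat 0 := by
      intro c hm hcx
      have hc1 : (1:Int) ≤ c := hc c hm
      have h1 : (((k:Int)+1) - c).toNat < (refDP coins k).length := by
        rw [hlenr]; omega
      rw [List.getD_eq_getElem (refDP coins k) 0 h1]
      have h2 : (((k:Int)+1) - c).toNat < t.length := by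
        rw [ht]; simp only [List.length_append, List.length_replicate, hlenr]; omega
      rw [List.getD_eq_getElem t 0 h2]
      exact List.getElem_append_left (bs := List.replicate (n - k) 1000000000) (h' := by simp; omega) h1
    have hinner := inner_fold_eq coins ((k:Int)+1) t (refDP coins k) hc hread none 1000000000
      (by simp) (by omega)
    rw [hstart, hinner]
    have hbb : ((coins.foldl (fun b c =>
          if c ≤ (k:Int)+1 ∧ (refDP coins k).getD (((k:Int)+1) - c).toNat 0 < 1000000000 then
            some (match b with | none => (refDP coins k).getD (((k:Int)+1) - c).toNat 0 + 1 | some m => min m ((refDP coins k).getD (((k:Int)+1) - c).toNat 0 + 1))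
          else b) (none : Option Int)).getD 1000000000) = bbestL (refDP coins k) ((k:Int)+1) coins := rfl
    rw [hbb, htn]
    rw [ht, ← hlenr, hnk]
    simp [refDP, List.replicate_succ, hlenr]

theorem table_eq (coins : List Int) (hc : ∀ c ∈ coins, 1 ≤ c) (n : ℕ) :
    (dp_min_coins_up_to (n : Int) coins).toList = refDP coins n := by
  unfold dp_min_coins_up_to
  rw [← List.foldl_hom (f := Array.toList)
      (g₂ := fun (dp : List Int) (x : Int) =>
        dp.set x.toNat (coins.foldl (fun best c =>
          if c ≤ x then
            if dp.getD (x - c).toNat 0 + 1 < best then dp.getD (x - c).toNat 0 + 1 else best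
          else best) (dp.getD x.toNat 0)))
      (by
        intro a x
        simp only [Array.toList_setIfInBounds, arr_getD_toList])]
  simp only [Array.toList_setIfInBounds, Array.toList_replicate]
  rw [tableAux coins hc n n le_rfl]
  simp

theorem greedy_eq (cs : List Int) : ∀ (rem cnt : Int), 0 ≤ rem → (∀ c ∈ cs, 1 ≤ c) →
    (if (greedy_loop cs rem cnt).1 = 0 then some (greedy_loop cs rem cnt).2 else none)
    = (greedy_alt rem cs).map (fun s => cnt + s) := by
  induction cs with
  | nil =>
    intro rem cnt _ _
    unfold greedy_loop greedy_alt
    by_cases h : rem = 0 <;> simp [h]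
  | cons c cs ih =>
    intro rem cnt hrem hc
    have hc1 : (1 : Int) ≤ c := hc c (by simp)
    have hcs : ∀ c' ∈ cs, (1 : Int) ≤ c' := fun c' h' => hc c' (by simp [h'])
    by_cases h0 : rem = 0
    · subst h0
      unfold greedy_loop greedy_alt
      simp
    · have hpos : 0 < rem := lt_of_le_of_ne hrem (Ne.symm h0)
      have hnle : ¬ rem ≤ 0 := by omega
      set k := PySem.Int.floordiv rem c with hk
      have hmod : k * c + PySem.Int.mod rem c = rem := PySem.Int.floordiv_mul_add_mod rem c
      have hmodnn : 0 ≤ PySem.Int.mod rem c := PySem.Int.mod_nonneg rem (by omega)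
      have hrem' : 0 ≤ rem - k * c := by omega
      have halt : greedy_alt rem (c :: cs)
          = (greedy_alt (rem - k * c) cs).map (fun s => k + s) := by
        rw [greedy_alt]; simp [h0, ← hk]
      by_cases hkz : k = 0
      · have hloop : greedy_loop (c :: cs) rem cnt = greedy_loop cs rem cnt := by
          rw [greedy_loop]; simp [hnle, ← hk, hkz]
        have e : rem - k * c = rem := by rw [hkz]; ring
        rw [hloop, halt, e, ih rem cnt hrem hcs, hkz]
        cases greedy_alt rem cs <;> simp
      · have hloop : greedy_loop (c :: cs) rem cnt = greedy_loop cs (rem - k * c) (cnt + k) := by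
          rw [greedy_loop]; simp [hnle, ← hk, hkz]
        rw [hloop, halt]
        rw [ih (rem - k * c) (cnt + k) hrem' hcs]
        cases greedy_alt (rem - k * c) cs <;> simp
        ring

theorem greedy_num_eq (a : Int) (cs : List Int) (ha : 0 ≤ a) (hc : ∀ c ∈ cs, 1 ≤ c) :
    greedy_num_coins a cs = greedy_alt a cs := by
  unfold greedy_num_coins
  have := greedy_eq cs a 0 ha hc
  simp only [] at this ⊢
  rw [this]
  cases greedy_alt a cs <;> simp

theorem refDP_prefix (coins : List Int) (k : ℕ) : ∀ j : ℕ, ∃ t, refDP coins (k + j) = refDP coins k ++ t := by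
  intro j
  induction j with
  | zero => exact ⟨[], by simp⟩
  | succ j ih =>
    obtain ⟨t, ht⟩ := ih
    refine ⟨t ++ [bbestL (refDP coins (k + j)) (((k + j : ℕ) : Int) + 1) coins], ?_⟩
    rw [show k + (j+1) = (k+j) + 1 by omega, refDP, ht, List.append_assoc]

theorem refDP_getD (coins : List Int) (k n : ℕ) (h : k < n) :
    (refDP coins n).getD (k + 1) 0 = bbestL (refDP coins k) ((k : Int) + 1) coins := by
  obtain ⟨t, ht⟩ := refDP_prefix coins (k + 1) (n - (k + 1))
  rw [show n = (k + 1) + (n - (k + 1)) by omega, ht, refDP, List.append_assoc]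
  rw [show k + 1 = (refDP coins k).length by rw [refDP_length]]
  simp [List.getD, List.getElem?_append_right]

theorem checkStep_foldl_inl (dp : Array Int) (cd : List Int) (l : List Int) (r : Bool × Int) :
    l.foldl (checkStep dp cd) (Sum.inl r) = Sum.inl r := by
  induction l with
  | nil => rfl
  | cons a l ih => simpa [List.foldl_cons, checkStep] using ih

theorem altStep_foldl_inl (cs cd : List Int) (l : List Int) (r : Bool × Int) :
    l.foldl (altStep cs cd) (Sum.inl r) = Sum.inl r := by
  induction l with
  | nil => rfl
  | cons a l ih => simpa [List.foldl_cons, altStep] using ih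

theorem simAux (coins : List Int) (hc : ∀ c ∈ coins, 1 ≤ c) (n : ℕ) (rr : Bool)
    (dpA : Array Int) (hdpA : dpA.toList = refDP coins n) :
    ∀ j k : ℕ, j + k = n → ∀ (cnt : Int) (aB : Array Int), aB.toList = refDP coins k →
    (match (PySem.List.pyRange ((k : Int) + 1) ((n : Int) + 1) 1).foldl
        (checkStep dpA coins.reverse) (Sum.inr cnt) with
      | Sum.inl r => r
      | Sum.inr cnt => if rr && cnt == 0 then (false, cnt) else (true, cnt))
    = (match (PySem.List.pyRange ((k : Int) + 1) ((n : Int) + 1) 1).foldl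
        (altStep coins coins.reverse) (Sum.inr (aB, cnt)) with
      | Sum.inl r => r
      | Sum.inr (_, reachable) => if rr && reachable == 0 then (false, reachable) else (true, reachable)) := by
  intro j
  induction j with
  | zero =>
    intro k hk cnt aB haB
    have : k = n := by omega
    subst this
    rw [PySem.List.pyRange_one_eq_nil (by omega)]
    rfl
  | succ j ih =>
    intro k hk cnt aB haB
    have hklt : k < n := by omega
    rw [PySem.List.pyRange_one_cons (by push_cast; omega), List.foldl_cons, List.foldl_cons]
    have hval : dpA.getD ((k : Int) + 1).toNat 0
        = bbestL (refDP coins k) ((k : Int) + 1) coins := by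
      rw [arr_getD_toList, hdpA, show ((k : Int) + 1).toNat = k + 1 by omega]
      exact refDP_getD coins k n hklt
    have hg : greedy_num_coins ((k : Int) + 1) coins.reverse
        = greedy_alt ((k : Int) + 1) coins.reverse := by
      refine greedy_num_eq _ _ (by omega) ?_
      intro c hm
      exact hc c (List.mem_reverse.mp hm)
    have hbb : bbest aB ((k : Int) + 1) coins = bbestL (refDP coins k) ((k : Int) + 1) coins := by
      rw [bbest_toList, haB]
    have haB' : (aB.push (bbestL (refDP coins k) ((k : Int) + 1) coins)).toList = refDP coins (k + 1) := by
      rw [Array.toList_push, haB]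
      rfl
    have hAstep : checkStep dpA coins.reverse (Sum.inr cnt) ((k : Int) + 1)
        = if bbestL (refDP coins k) ((k : Int) + 1) coins ≥ 1000000000 then Sum.inr cnt
          else if greedy_alt ((k : Int) + 1) coins.reverse ≠ some (bbestL (refDP coins k) ((k : Int) + 1) coins)
            then Sum.inl (false, cnt + 1)
            else Sum.inr (cnt + 1) := by
      simp only [checkStep, hval, hg]
    have hBstep : altStep coins coins.reverse (Sum.inr (aB, cnt)) ((k : Int) + 1)
        = if bbestL (refDP coins k) ((k : Int) + 1) coins < 1000000000 then
            (if greedy_alt ((k : Int) + 1) coins.reverse ≠ some (bbestL (refDP coins k) ((k : Int) + 1) coins)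
             then Sum.inl (false, cnt + 1)
             else Sum.inr (aB.push (bbestL (refDP coins k) ((k : Int) + 1) coins), cnt + 1))
          else Sum.inr (aB.push (bbestL (refDP coins k) ((k : Int) + 1) coins), cnt) := by
      simp only [altStep, hbb]
    rw [hAstep, hBstep]
    set best := bbestL (refDP coins k) ((k : Int) + 1) coins with hbest
    have hcast : ((k : Int) + 1) + 1 = ((k + 1 : ℕ) : Int) + 1 := by push_cast; ring
    by_cases hb : best < 1000000000
    · rw [if_neg (by omega), if_pos hb]
      by_cases hgg : greedy_alt ((k : Int) + 1) coins.reverse = some best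
      · rw [if_neg (by simp [hgg]), if_neg (by simp [hgg])]
        rw [hcast]
        exact ih (k + 1) (by omega) (cnt + 1) _ haB'
      · rw [if_pos (by simp [hgg]), if_pos (by simp [hgg])]
        rw [checkStep_foldl_inl, altStep_foldl_inl]
    · rw [if_pos (by omega), if_neg hb]
      rw [hcast]
      exact ih (k + 1) (by omega) cnt _ haB'

theorem main_sim (coins : List Int) (hc : ∀ c ∈ coins, 1 ≤ c) (n : ℕ) (rr : Bool) :
    check_canonical coins (n : Int) rr = check_canonical_alt coins (n : Int) rr := by
  unfold check_canonical check_canonical_alt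
  have := simAux coins hc n rr (dp_min_coins_up_to (n : Int) coins) (table_eq coins hc n)
    n 0 (by omega) 0 #[(0 : Int)] rfl
  simpa using this

theorem zero_case (coins : List Int) (rr : Bool) :
    check_canonical coins 0 rr = check_canonical_alt coins 0 rr := by
  unfold check_canonical check_canonical_alt
  rw [show (0 : Int) + 1 = 1 by norm_num, PySem.List.pyRange_one_eq_nil (by omega)]
  rfl

-- ===== VERDICT (by name: the statement is the Claim_ definition above) =====
theorem check_canonical_spec : Claim_equal_check_canonical := by
  intro coins max rr _ hpre
  obtain ⟨h0, hrest⟩ := hpre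
  unfold Spec_check_canonical
  obtain ⟨n, rfl⟩ : ∃ n : ℕ, max = (n : Int) := ⟨max.toNat, by omega⟩
  rcases hrest with hz | hc
  · have : n = 0 := by omega
    subst this
    exact zero_case coins rr
  · exact main_sim coins hc n rr
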